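-- pv_equiv track=rewrite | github.com/sniyaz/nlp_segment | model_seg.py | get_neighbor_ngrams
-- ===== SOURCE A (Python) =====
-- def get_neighbor_ngrams(word_seg, pair_index_1, pair_index_2, n):
--     neighbor_ngrams = []
--     new_char = word_seg[pair_index_1] + word_seg[pair_index_2]
--
--     ngram = [new_char]
--     #For when we go and calculate the ngrams that were replaced.
--     temp_ngram = [word_seg[pair_index_1]]
--
--     back_index = pair_index_1
--     for i in range(n):
--         back_index -= 1
--         ngram.insert(0, word_seg[back_index])
--         temp_ngram.insert(0, word_seg[back_index])
--
--     neighbor_ngrams.append(tuple(ngram))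
--
--     #First forward pass to find all the NEW ngrams!
--     front_index = pair_index_2
--
--     for i in range(n):
--         front_index += 1
--         ngram.append(word_seg[front_index])
--         ngram.pop(0)
--         neighbor_ngrams.append(tuple(ngram))
--
--     #One more "forward pass"
--     #Returns the old/replaced n-grams in the changed section so new corpus prob can be calculated.
--     previous_ngrams = []
--     ngram = temp_ngram
--     previous_ngrams.append(tuple(ngram))
--
--     front_index = pair_index_1
--
--     for i in range(n):
--         front_index += 1
--         ngram.append(word_seg[front_index])
--         ngram.pop(0)
--         previous_ngrams.append(tuple(ngram))
--
--     #pdb.set_trace()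
--     return neighbor_ngrams, previous_ngrams
-- ===== SOURCE B (Python) =====
-- def get_neighbor_ngrams(word_seg, pair_index_1, pair_index_2, n):
--     # Materialize the merged and the original character sequences once, then
--     # read every ngram off them as sliding windows.
--     back = [word_seg[pair_index_1 - n + i] for i in range(n)]
--     seq_new = back + [word_seg[pair_index_1] + word_seg[pair_index_2]] \
--         + [word_seg[pair_index_2 + 1 + i] for i in range(n)]
--     seq_old = back + [word_seg[pair_index_1]] \
--         + [word_seg[pair_index_1 + 1 + i] for i in range(n)]
--     def windows(seq):
--         return [tuple(seq[i:i + n + 1]) for i in range(n + 1)]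
--     return windows(seq_new), windows(seq_old)
-- ===== Notes on version B (the rewrite author's own statement) =====
-- stated objective: simpler
-- what changed: A mutates one sliding ngram in place across three loops (insert(0,..)/append/pop(0)); B materializes the merged and the original character sequences once and reads each result off as sliding windows via slicing; Pre_ excludes negative n, a degenerate corner where A no-ops its loops and returns the same single stub ngrams as n=0 while B returns no windows - both defensible.
-- outside the precondition, e.g. on get_neighbor_ngrams(['a', 'b'], 0, 1, -1): A returns ([('ab',)], [('a',)]), B returns ([], [])
import Mathlib
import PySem

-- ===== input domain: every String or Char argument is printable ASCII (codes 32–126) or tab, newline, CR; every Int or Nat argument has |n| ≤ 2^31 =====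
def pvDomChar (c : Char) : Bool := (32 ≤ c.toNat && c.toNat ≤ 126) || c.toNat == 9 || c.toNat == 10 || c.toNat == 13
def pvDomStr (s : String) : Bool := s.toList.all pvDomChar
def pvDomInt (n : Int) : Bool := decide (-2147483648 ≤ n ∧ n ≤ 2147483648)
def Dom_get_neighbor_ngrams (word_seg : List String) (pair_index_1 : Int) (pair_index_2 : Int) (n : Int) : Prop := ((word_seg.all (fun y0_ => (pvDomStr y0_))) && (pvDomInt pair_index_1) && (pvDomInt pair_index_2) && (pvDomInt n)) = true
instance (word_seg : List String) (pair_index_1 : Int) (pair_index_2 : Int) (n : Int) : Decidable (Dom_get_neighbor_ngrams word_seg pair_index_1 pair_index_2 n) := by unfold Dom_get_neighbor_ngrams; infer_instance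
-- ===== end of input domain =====

-- B replaces A's mutate-in-place sliding ngram (insert/append/pop over three loops) by materializing the
-- merged and original character sequences once and reading every ngram off them as sliding windows (simpler).

-- word_seg[i] with Python's negative-index wraparound; "" is never read under Pre_ (none = IndexError).
def pvGet (w : List String) (i : Int) : String := (PySem.List.pyGet? w i).getD ""

-- ===== PORT A =====
def get_neighbor_ngrams (word_seg : List String) (pair_index_1 : Int) (pair_index_2 : Int) (n : Int) : List (List String) × List (List String) :=
  let new_char := pvGet word_seg pair_index_1 ++ pvGet word_seg pair_index_2
  -- back loop: back_index, ngram, temp_ngram (insert(0, x) = cons)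
  let r0 := (PySem.List.pyRange 0 n 1).foldl
    (fun (st : Int × List String × List String) _ =>
      (st.1 - 1, pvGet word_seg (st.1 - 1) :: st.2.1, pvGet word_seg (st.1 - 1) :: st.2.2))
    (pair_index_1, [new_char], [pvGet word_seg pair_index_1])
  let ngram := r0.2.1
  let temp_ngram := r0.2.2
  -- first forward pass: front_index, ngram, neighbor_ngrams (append then pop(0) = drop 1)
  let r1 := (PySem.List.pyRange 0 n 1).foldl
    (fun (st : Int × List String × List (List String)) _ =>
      (st.1 + 1, (st.2.1 ++ [pvGet word_seg (st.1 + 1)]).drop 1,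
       st.2.2 ++ [(st.2.1 ++ [pvGet word_seg (st.1 + 1)]).drop 1]))
    (pair_index_2, ngram, [ngram])
  -- second forward pass over the old ngram
  let r2 := (PySem.List.pyRange 0 n 1).foldl
    (fun (st : Int × List String × List (List String)) _ =>
      (st.1 + 1, (st.2.1 ++ [pvGet word_seg (st.1 + 1)]).drop 1,
       st.2.2 ++ [(st.2.1 ++ [pvGet word_seg (st.1 + 1)]).drop 1]))
    (pair_index_1, temp_ngram, [temp_ngram])
  (r1.2.2, r2.2.2)

-- ===== PORT B =====
def get_neighbor_ngrams_alt (word_seg : List String) (pair_index_1 : Int) (pair_index_2 : Int) (n : Int) : List (List String) × List (List String) :=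
  let back := (PySem.List.pyRange 0 n 1).map (fun i => pvGet word_seg (pair_index_1 - n + i))
  let seq_new := back ++ [pvGet word_seg pair_index_1 ++ pvGet word_seg pair_index_2]
      ++ (PySem.List.pyRange 0 n 1).map (fun i => pvGet word_seg (pair_index_2 + 1 + i))
  let seq_old := back ++ [pvGet word_seg pair_index_1]
      ++ (PySem.List.pyRange 0 n 1).map (fun i => pvGet word_seg (pair_index_1 + 1 + i))
  let windows := fun (seq : List String) =>
    (PySem.List.pyRange 0 (n + 1) 1).map
      (fun i => PySem.List.slice seq (some i) (some (i + n + 1)))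
  (windows seq_new, windows seq_old)

-- ===== PRECONDITION & SPEC =====
-- Pre_ excludes (a) the inputs where Python A raises IndexError: some accessed index
-- (pair_index_1, pair_index_2, and for n > 0 the extremes pair_index_1 ± n, pair_index_2 + n,
-- which bound all intermediate accesses) is out of [-len, len); and (b) negative n, a degenerate
-- corner outside the function's natural domain, where A's loops silently no-op and return the same
-- single degenerate "ngrams" as n = 0 while B naturally returns no windows — both are defensible.
def Pre_get_neighbor_ngrams (word_seg : List String) (pair_index_1 : Int) (pair_index_2 : Int) (n : Int) : Prop :=
  0 ≤ n ∧
  PySem.Raise.InRange word_seg.length pair_index_1 ∧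
  PySem.Raise.InRange word_seg.length pair_index_2 ∧
  (0 < n → PySem.Raise.InRange word_seg.length (pair_index_1 - n) ∧
           PySem.Raise.InRange word_seg.length (pair_index_2 + n) ∧
           PySem.Raise.InRange word_seg.length (pair_index_1 + n))
instance (word_seg : List String) (pair_index_1 : Int) (pair_index_2 : Int) (n : Int) : Decidable (Pre_get_neighbor_ngrams word_seg pair_index_1 pair_index_2 n) := by unfold Pre_get_neighbor_ngrams; infer_instance

def pvWitness_get_neighbor_ngrams : List String × Int × Int × Int := (["a", "b", "c"], 0, 1, 1)

def Spec_get_neighbor_ngrams (word_seg : List String) (pair_index_1 : Int) (pair_index_2 : Int) (n : Int) (out : List (List String) × List (List String)) : Prop := out = get_neighbor_ngrams_alt word_seg pair_index_1 pair_index_2 n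
instance (word_seg : List String) (pair_index_1 : Int) (pair_index_2 : Int) (n : Int) (out : List (List String) × List (List String)) : Decidable (Spec_get_neighbor_ngrams word_seg pair_index_1 pair_index_2 n out) := by unfold Spec_get_neighbor_ngrams; infer_instance

-- ===== CLAIM (what is proved, stated in full; the proofs are below) =====
def Claim_equal_get_neighbor_ngrams : Prop := ∀ (word_seg : List String) (pair_index_1 : Int) (pair_index_2 : Int) (n : Int), Dom_get_neighbor_ngrams word_seg pair_index_1 pair_index_2 n → Pre_get_neighbor_ngrams word_seg pair_index_1 pair_index_2 n → Spec_get_neighbor_ngrams word_seg pair_index_1 pair_index_2 n (get_neighbor_ngrams word_seg pair_index_1 pair_index_2 n)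

-- ===== LEMMAS AND PROOFS =====

lemma pv_back_fold (w : List String) :
    ∀ (l : List Int) (p : Int) (x y : List String),
      l.foldl (fun (st : Int × List String × List String) _ =>
          (st.1 - 1, pvGet w (st.1 - 1) :: st.2.1, pvGet w (st.1 - 1) :: st.2.2)) (p, x, y)
      = (p - l.length,
         ((List.range l.length).map (fun i : Nat => pvGet w (p - l.length + (i : Int)))) ++ x,
         ((List.range l.length).map (fun i : Nat => pvGet w (p - l.length + (i : Int)))) ++ y) := by
  intro l
  induction l with
  | nil => intro p x y; simp
  | cons a tl ih =>
    intro p x y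
    simp only [List.foldl_cons, ih, List.length_cons]
    have hmap : (List.range (tl.length + 1)).map
          (fun i : Nat => pvGet w (p - (((tl.length : Nat) + 1 : Nat) : Int) + (i : Int)))
        = (List.range tl.length).map
            (fun i : Nat => pvGet w (p - 1 - (tl.length : Int) + (i : Int))) ++ [pvGet w (p - 1)] := by
      rw [List.range_succ, List.map_append]
      congr 1
      · apply List.map_congr_left; intro i _; congr 1; push_cast; ring
      · simp only [List.map_cons, List.map_nil]; congr 2; push_cast; ring
    simp only [Prod.mk.injEq]
    refine ⟨by push_cast; ring, ?_, ?_⟩ <;>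
    · rw [hmap, List.append_assoc, List.singleton_append]

def pvWin (seq : List String) (m t : Nat) : List String := (seq.drop t).take (m + 1)

lemma pv_win_step (seq : List String) (m t : Nat) (h : t + m + 2 ≤ seq.length) :
    (pvWin seq m t ++ [seq.getD (t + m + 1) ""]).drop 1 = pvWin seq m (t + 1) := by
  have hlen : (pvWin seq m t).length = m + 1 := by
    simp [pvWin]; omega
  rw [List.drop_append_of_le_length (by omega)]
  unfold pvWin
  rw [List.drop_take, List.drop_drop]
  have : m + 1 - 1 = m := by omega
  rw [this]
  rw [List.take_add_one]
  congr 1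
  have hidx : t + 1 + m < seq.length := by omega
  rw [List.getElem?_drop]
  have : seq[t + 1 + m]? = some seq[t + 1 + m] := List.getElem?_eq_getElem hidx
  rw [this, List.getD_eq_getElem?_getD]
  have : t + m + 1 = t + 1 + m := by omega
  rw [this, List.getElem?_eq_getElem hidx]
  rfl

lemma pv_fwd_fold (w seq : List String) (m : Nat) :
    ∀ (l : List Int) (t : Nat) (fi : Int) (acc : List (List String)),
      t + l.length + m + 1 ≤ seq.length →
      (∀ k : Nat, k < l.length → pvGet w (fi + 1 + (k : Int)) = seq.getD (t + m + 1 + k) "") →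
      l.foldl (fun (st : Int × List String × List (List String)) _ =>
          (st.1 + 1, (st.2.1 ++ [pvGet w (st.1 + 1)]).drop 1,
           st.2.2 ++ [(st.2.1 ++ [pvGet w (st.1 + 1)]).drop 1])) (fi, pvWin seq m t, acc)
      = (fi + l.length, pvWin seq m (t + l.length),
         acc ++ (List.range l.length).map (fun k : Nat => pvWin seq m (t + 1 + k))) := by
  intro l
  induction l with
  | nil => intro t fi acc _ _; simp
  | cons a tl ih =>
    intro t fi acc hlen hget
    have h0 : pvGet w (fi + 1) = seq.getD (t + m + 1) "" := by
      have := hget 0 (by simp)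
      simpa using this
    have hstep : (pvWin seq m t ++ [pvGet w (fi + 1)]).drop 1 = pvWin seq m (t + 1) := by
      rw [h0]; exact pv_win_step seq m t (by simp at hlen; omega)
    simp only [List.foldl_cons, hstep]
    rw [ih (t + 1) (fi + 1) (acc ++ [pvWin seq m (t + 1)])
        (by simp at hlen ⊢; omega)
        (by intro k hk
            have := hget (k + 1) (by simp at hk ⊢; omega)
            push_cast at this ⊢
            have e1 : fi + 1 + 1 + (k : Int) = fi + 1 + ((k : Int) + 1) := by ring
            have e2 : t + 1 + m + 1 + k = t + m + 1 + (k + 1) := by omega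
            rw [e1, e2]; exact this)]
    simp only [Prod.mk.injEq, List.length_cons]
    refine ⟨by push_cast; ring, by congr 1; omega, ?_⟩
    rw [List.append_assoc]
    congr 1
    rw [List.singleton_append, List.range_succ_eq_map, List.map_cons, List.map_map]
    congr 1
    apply List.map_congr_left
    intro k _
    simp only [Function.comp]
    congr 1
    omega

lemma pv_side (w back : List String) (N : Nat) (p : Int) (c : String)
    (hb : back.length = N) :
    ((PySem.List.pyRange 0 (N : Int) 1).foldl (fun (st : Int × List String × List (List String)) _ =>
          (st.1 + 1, (st.2.1 ++ [pvGet w (st.1 + 1)]).drop 1,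
           st.2.2 ++ [(st.2.1 ++ [pvGet w (st.1 + 1)]).drop 1]))
        (p, back ++ [c], [back ++ [c]])).2.2
    = (List.range (N + 1)).map
        (pvWin (back ++ [c] ++ (List.range N).map (fun i : Nat => pvGet w (p + 1 + (i : Int)))) N) := by
  set fwd := (List.range N).map (fun i : Nat => pvGet w (p + 1 + (i : Int))) with hfwd
  set seq := back ++ [c] ++ fwd with hseq
  have hlenpre : (back ++ [c]).length = N + 1 := by simp [hb]
  have hlenseq : seq.length = N + 1 + N := by simp [hseq, hfwd, hb]; omega
  have hwin0 : back ++ [c] = pvWin seq N 0 := by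
    unfold pvWin
    rw [List.drop_zero, hseq, List.take_left' hlenpre]
  have hlenrange : (PySem.List.pyRange 0 (N : Int) 1).length = N := by
    rw [PySem.List.pyRange_zero_natCast, List.length_map, List.length_range]
  have hget : ∀ k : Nat, k < (PySem.List.pyRange 0 (N : Int) 1).length →
      pvGet w (p + 1 + (k : Int)) = seq.getD (0 + N + 1 + k) "" := by
    intro k hk
    rw [hlenrange] at hk
    rw [hseq, List.getD_append_right _ _ _ _ (by rw [hlenpre]; omega)]
    have : 0 + N + 1 + k - (back ++ [c]).length = k := by rw [hlenpre]; omega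
    rw [this, hfwd, PySem.List.getD_map_range _ _ _ _ hk]
  rw [hwin0]
  rw [pv_fwd_fold w seq N (PySem.List.pyRange 0 (N : Int) 1) 0 p [pvWin seq N 0]
      (by rw [hlenrange, hlenseq]; omega) hget]
  simp only [hlenrange]
  rw [List.range_succ_eq_map, List.map_cons, List.map_map]
  rw [List.singleton_append]
  congr 1
  apply List.map_congr_left
  intro k _
  simp only [Function.comp]
  congr 1
  omega

theorem pv_main (w : List String) (p1 p2 n : Int) (hn : 0 ≤ n) :
    get_neighbor_ngrams w p1 p2 n = get_neighbor_ngrams_alt w p1 p2 n := by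
  obtain ⟨N, rfl⟩ : ∃ N : Nat, n = (N : Int) := ⟨n.toNat, (Int.toNat_of_nonneg hn).symm⟩
  simp only [get_neighbor_ngrams, get_neighbor_ngrams_alt]
  rw [pv_back_fold w (PySem.List.pyRange 0 (N : Int) 1) p1 _ _]
  have hlenrange : (PySem.List.pyRange 0 (N : Int) 1).length = N := by
    rw [PySem.List.pyRange_zero_natCast, List.length_map, List.length_range]
  simp only [hlenrange]
  rw [pv_side w _ N p2 _ (by simp), pv_side w _ N p1 _ (by simp)]
  have hbound : (N : Int) + 1 = ((N + 1 : Nat) : Int) := by push_cast; ring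
  simp only [hbound, PySem.List.pyRange_zero_natCast, List.map_map,
    Function.comp_def, Prod.mk.injEq]
  constructor <;>
  · symm
    apply List.map_congr_left
    intro i _
    have hb : ((i : Nat) : Int) + (N : Int) + 1 = ((i : Nat) : Int) + ((N + 1 : Nat) : Int) := by
      push_cast; ring
    rw [hb, PySem.List.slice_natCast_add]
    rfl

-- ===== VERDICT (by name: the statement is the Claim_ definition above) =====
theorem get_neighbor_ngrams_spec : Claim_equal_get_neighbor_ngrams := by
  intro w p1 p2 n _ hpre
  unfold Spec_get_neighbor_ngrams
  exact pv_main w p1 p2 n hpre.1
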